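-- pv_equiv track=rewrite | github.com/harshitpoddar09/InterviewBit-Solutions | Programming/Arrays/Sorting/Noble Integer.py | solve
-- ===== SOURCE A (Python) =====
-- def solve(A):
--     A=sorted(A)
--     n=len(A)
--     for i in range(n):
--         j=i+1
--         while j<n and A[j]==A[i]:
--             j+=1
--         if A[i]==n-j:
--             return 1
--     return -1
-- ===== SOURCE B (Python) =====
-- def solve(A):
--     A = sorted(A)
--     n = len(A)
--     for i in range(n):
--         if (i == n - 1 or A[i] != A[i + 1]) and A[i] == n - i - 1:
--             return 1
--     return -1
-- ===== Notes on version B (the rewrite author's own statement) =====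
-- stated objective: faster
-- what changed: The inner while-loop that rescans each duplicate block is removed: B checks the greater-count condition only at each duplicate-block boundary (A[i] != A[i+1]) in a single pass after sorting.
import Mathlib
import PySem

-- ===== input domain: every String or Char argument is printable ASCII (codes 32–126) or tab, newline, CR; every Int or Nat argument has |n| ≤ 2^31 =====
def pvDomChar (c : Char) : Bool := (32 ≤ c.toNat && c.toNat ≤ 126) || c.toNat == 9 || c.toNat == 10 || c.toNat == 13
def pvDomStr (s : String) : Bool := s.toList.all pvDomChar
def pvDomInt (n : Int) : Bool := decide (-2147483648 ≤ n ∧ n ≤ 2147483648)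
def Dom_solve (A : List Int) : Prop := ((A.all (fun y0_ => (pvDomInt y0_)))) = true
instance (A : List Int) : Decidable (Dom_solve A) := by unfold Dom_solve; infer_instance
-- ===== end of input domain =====

-- B removes A's inner duplicate-block rescan: one pass over the sorted list, testing only block boundaries.

-- ===== PORT A =====
-- the inner 'while j<n and A[j]==A[i]: j+=1' (returns the final j)
def solveWhile (S : List Int) (n : Int) (ai : Int) (j : Int) : Int :=
  if h : j < n ∧ PySem.List.pyGet? S j = some ai then solveWhile S n ai (j + 1)
  else j
termination_by (n - j).toNat
decreasing_by omega

-- the outer 'for i in range(n)' with early return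
def solveLoop (S : List Int) (n : Int) (i : Int) : Int :=
  if h : i < n then
    let ai := (PySem.List.pyGet? S i).getD 0
    let j := solveWhile S n ai (i + 1)
    if ai = n - j then 1 else solveLoop S n (i + 1)
  else -1
termination_by (n - i).toNat
decreasing_by omega

def solve (A : List Int) : Int :=
  let S := PySem.List.sorted A (fun x => x) false
  solveLoop S (S.length : Int) 0

-- ===== PORT B =====
def altLoop (S : List Int) (n : Int) (i : Int) : Int :=
  if h : i < n then
    if (i = n - 1 ∨ PySem.List.pyGet? S i ≠ PySem.List.pyGet? S (i + 1)) ∧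
        (PySem.List.pyGet? S i).getD 0 = n - i - 1 then 1
    else altLoop S n (i + 1)
  else -1
termination_by (n - i).toNat
decreasing_by omega

def solve_alt (A : List Int) : Int :=
  let S := PySem.List.sorted A (fun x => x) false
  altLoop S (S.length : Int) 0

-- ===== PRECONDITION & SPEC =====
def Spec_solve (A : List Int) (out : Int) : Prop := out = solve_alt A
instance (A : List Int) (out : Int) : Decidable (Spec_solve A out) := by unfold Spec_solve; infer_instance

-- ===== CLAIM (what is proved, stated in full; the proofs are below) =====
def Claim_equal_solve : Prop := ∀ (A : List Int), Dom_solve A → Spec_solve A (solve A)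

-- ===== LEMMAS AND PROOFS =====

-- A's per-index condition: value equals count of elements after the duplicate block
def PA (S : List Int) (n i : Int) : Prop :=
  (PySem.List.pyGet? S i).getD 0 = n - solveWhile S n ((PySem.List.pyGet? S i).getD 0) (i + 1)

-- B's per-index condition
def PB (S : List Int) (n i : Int) : Prop :=
  (i = n - 1 ∨ PySem.List.pyGet? S i ≠ PySem.List.pyGet? S (i + 1)) ∧
    (PySem.List.pyGet? S i).getD 0 = n - i - 1

theorem solveWhile_ge (S : List Int) (n ai j : Int) : j ≤ solveWhile S n ai j := by
  unfold solveWhile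
  split
  · have := solveWhile_ge S n ai (j + 1); omega
  · omega
termination_by (n - j).toNat
decreasing_by omega

theorem solveWhile_le (S : List Int) (n ai j : Int) (h : j ≤ n) : solveWhile S n ai j ≤ n := by
  unfold solveWhile
  split
  · exact solveWhile_le S n ai (j + 1) (by omega)
  · omega
termination_by (n - j).toNat
decreasing_by omega

theorem solveWhile_stop (S : List Int) (n ai j : Int) :
    ¬ (solveWhile S n ai j < n ∧ PySem.List.pyGet? S (solveWhile S n ai j) = some ai) := by
  unfold solveWhile
  split
  · exact solveWhile_stop S n ai (j + 1)
  · next h => exact h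
termination_by (n - j).toNat
decreasing_by omega

theorem solveWhile_block (S : List Int) (n ai j : Int) :
    ∀ k, j ≤ k → k < solveWhile S n ai j → PySem.List.pyGet? S k = some ai := by
  unfold solveWhile
  split
  · next h =>
    intro k hk1 hk2
    rcases eq_or_lt_of_le hk1 with rfl | hlt
    · exact h.2
    · exact solveWhile_block S n ai (j + 1) k (by omega) hk2
  · intro k hk1 hk2; omega
termination_by (n - j).toNat
decreasing_by omega

theorem solveWhile_eq_of_stop (S : List Int) (n ai j : Int)
    (h : ¬ (j < n ∧ PySem.List.pyGet? S j = some ai)) : solveWhile S n ai j = j := by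
  unfold solveWhile; rw [dif_neg h]

theorem pyGet?_some_of_range (S : List Int) (i : Int) (h0 : 0 ≤ i) (h1 : i < (S.length : Int)) :
    PySem.List.pyGet? S i = some ((PySem.List.pyGet? S i).getD 0) := by
  have h := PySem.List.pyGet?_eq_some_getElem (xs := S) (i := i) h0 (by exact_mod_cast h1)
  rw [h]
  simp

-- B's condition implies A's (the while loop stops immediately at a block boundary)
theorem PB_imp_PA (S : List Int) (i : Int) (h0 : 0 ≤ i) (h1 : i < (S.length : Int))
    (h : PB S (S.length : Int) i) : PA S (S.length : Int) i := by
  obtain ⟨hb, hv⟩ := h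
  set n := (S.length : Int)
  set ai := (PySem.List.pyGet? S i).getD 0 with hai
  have hstop : ¬ (i + 1 < n ∧ PySem.List.pyGet? S (i + 1) = some ai) := by
    rcases hb with hb | hb
    · omega
    · rintro ⟨_, hgi⟩
      exact hb ((pyGet?_some_of_range S i h0 h1).trans hgi.symm)
  unfold PA
  rw [solveWhile_eq_of_stop S n ai (i + 1) hstop]
  omega

-- A's condition at i yields B's condition at the end of the duplicate block
theorem PA_imp_PB (S : List Int) (i : Int) (h0 : 0 ≤ i) (h1 : i < (S.length : Int))
    (h : PA S (S.length : Int) i) :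
    ∃ k, i ≤ k ∧ k < (S.length : Int) ∧ PB S (S.length : Int) k := by
  set n := (S.length : Int)
  set ai := (PySem.List.pyGet? S i).getD 0 with hai
  set j := solveWhile S n ai (i + 1) with hj
  have hge : i + 1 ≤ j := solveWhile_ge S n ai (i + 1)
  have hle : j ≤ n := solveWhile_le S n ai (i + 1) (by omega)
  have hstop := solveWhile_stop S n ai (i + 1)
  refine ⟨j - 1, by omega, by omega, ?_⟩
  have hgjm : PySem.List.pyGet? S (j - 1) = some ai := by
    rcases eq_or_lt_of_le hge with he | hlt
    · rw [← he]; simp only [add_sub_cancel_right]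
      exact pyGet?_some_of_range S i h0 h1
    · exact solveWhile_block S n ai (i + 1) (j - 1) (by omega) (by omega)
  constructor
  · rcases eq_or_lt_of_le hle with he | hlt
    · left; omega
    · right
      have hgj : PySem.List.pyGet? S j ≠ some ai := fun hc => hstop ⟨hlt, hc⟩
      rw [hgjm]
      intro hc
      rw [show j - 1 + 1 = j by ring] at hc
      exact hgj hc.symm
  · rw [hgjm]
    simp only [Option.getD_some]
    unfold PA at h
    rw [← hj] at h
    omega

-- if PB holds somewhere in [i, n), altLoop from i returns 1
theorem alt_one_of_PB (S : List Int) (i k : Int) (hk1 : i ≤ k) (hk2 : k < (S.length : Int))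
    (h : PB S (S.length : Int) k) : altLoop S (S.length : Int) i = 1 := by
  unfold altLoop
  rw [dif_pos (by omega : i < (S.length : Int))]
  rcases eq_or_lt_of_le hk1 with rfl | hlt
  · unfold PB at h; rw [if_pos h]
  · split
    · rfl
    · exact alt_one_of_PB S (i + 1) k (by omega) hk2 h
termination_by ((S.length : Int) - i).toNat
decreasing_by omega

-- both loops are 'if ∃ boundary condition in [i, n) then 1 else -1'; we relate their tails
theorem loops_eq (S : List Int) (i : Int) (h0 : 0 ≤ i) :
    solveLoop S (S.length : Int) i = altLoop S (S.length : Int) i := by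
  by_cases hi : i < (S.length : Int)
  · rw [solveLoop, altLoop, dif_pos hi, dif_pos hi]
    show (if (PySem.List.pyGet? S i).getD 0 =
            (S.length : Int) - solveWhile S (S.length : Int) ((PySem.List.pyGet? S i).getD 0) (i + 1)
          then (1 : Int) else solveLoop S (S.length : Int) (i + 1)) = _
    by_cases hpb : PB S (S.length : Int) i
    · have hpa := PB_imp_PA S i h0 hi hpb
      unfold PA at hpa
      unfold PB at hpb
      rw [if_pos hpa, if_pos hpb]
    · have hpb' := hpb
      unfold PB at hpb'
      rw [if_neg hpb']
      by_cases hpa : PA S (S.length : Int) i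
      · rw [if_pos (by unfold PA at hpa; exact hpa)]
        obtain ⟨k, hk1, hk2, hk3⟩ := PA_imp_PB S i h0 hi hpa
        have hki : i < k := by
          rcases eq_or_lt_of_le hk1 with rfl | h
          · exact absurd hk3 hpb
          · exact h
        exact (alt_one_of_PB S (i + 1) k (by omega) hk2 hk3).symm
      · rw [if_neg (by unfold PA at hpa; exact hpa)]
        exact loops_eq S (i + 1) (by omega)
  · rw [solveLoop, altLoop, dif_neg hi, dif_neg hi]
termination_by ((S.length : Int) - i).toNat
decreasing_by omega


-- ===== VERDICT (by name: the statement is the Claim_ definition above) =====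
theorem solve_spec : Claim_equal_solve := by
  intro A _
  unfold Spec_solve solve solve_alt
  exact loops_eq _ 0 le_rfl
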